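-- pv_equiv track=rewrite | github.com/Shiva224096/V4 | scripts/patterns.py | pattern_score_bonus
-- ===== SOURCE A (Python) =====
-- BEARISH_PATTERNS = {
--     "shooting_star", "evening_star", "bearish_engulfing",
--     "dark_cloud", "hanging_man", "three_black",
-- }
--
-- STRONG_BULLISH = {
--     "bullish_engulfing", "morning_star", "three_white",
--     "piercing_line", "bullish_marubozu",
-- }
--
-- MODERATE_BULLISH = {
--     "hammer", "inverted_hammer", "bullish_harami",
--     "tweezer_bottom", "dragonfly_doji",
-- }
--
-- def pattern_score_bonus(patterns: list[str]) -> int: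
--     """
--     Return score bonus based on detected patterns.
--     Strong bullish = +20, Moderate bullish = +10, Bearish = -5, None = 0.
--     """
--     has_strong  = any(p in STRONG_BULLISH for p in patterns)
--     has_moderate = any(p in MODERATE_BULLISH for p in patterns)
--     has_bearish = any(p in BEARISH_PATTERNS for p in patterns)
--
--     bonus = 0
--     if has_strong:
--         bonus += 20
--     elif has_moderate:
--         bonus += 10
--
--     if has_bearish:
--         bonus -= 5
--
--     return max(bonus, 0)
-- ===== SOURCE B (Python) =====
-- # One table-driven pass: pattern -> category lookup, collect categories seen, then score.
-- _CATEGORY = {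
--     "shooting_star": "bearish", "evening_star": "bearish",
--     "bearish_engulfing": "bearish", "dark_cloud": "bearish",
--     "hanging_man": "bearish", "three_black": "bearish",
--     "bullish_engulfing": "strong", "morning_star": "strong",
--     "three_white": "strong", "piercing_line": "strong",
--     "bullish_marubozu": "strong",
--     "hammer": "moderate", "inverted_hammer": "moderate",
--     "bullish_harami": "moderate", "tweezer_bottom": "moderate",
--     "dragonfly_doji": "moderate",
-- }
--
-- def pattern_score_bonus(patterns: list[str]) -> int:
--     seen = set()
--     for p in patterns:
--         c = _CATEGORY.get(p)
--         if c is not None: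
--             seen.add(c)
--     bonus = 20 if "strong" in seen else (10 if "moderate" in seen else 0)
--     if "bearish" in seen:
--         bonus -= 5
--     return max(bonus, 0)
-- ===== Notes on version B (the rewrite author's own statement) =====
-- stated objective: alternative
-- what changed: Replaces A's three independent any()-scans over the category sets by a single table-driven pass: a pattern->category dict is looked up once per pattern and the set of categories seen drives the same scoring.
import Mathlib
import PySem

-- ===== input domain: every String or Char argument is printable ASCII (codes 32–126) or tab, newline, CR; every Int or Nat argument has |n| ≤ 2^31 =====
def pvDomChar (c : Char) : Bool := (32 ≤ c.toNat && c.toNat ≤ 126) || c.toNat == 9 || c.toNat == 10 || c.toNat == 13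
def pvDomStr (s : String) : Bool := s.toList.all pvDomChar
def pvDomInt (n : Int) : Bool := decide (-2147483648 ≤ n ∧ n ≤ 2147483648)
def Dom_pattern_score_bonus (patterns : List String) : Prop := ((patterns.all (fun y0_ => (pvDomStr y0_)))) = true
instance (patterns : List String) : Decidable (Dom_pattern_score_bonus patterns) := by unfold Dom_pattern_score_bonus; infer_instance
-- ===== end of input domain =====

-- B replaces A's three any()-scans by one table-driven pass over a pattern->category dict (objective: alternative decomposition).

-- ===== PORT A =====
def BEARISH_PATTERNS : PySem.Set String := PySem.Set.ofList
  ["shooting_star", "evening_star", "bearish_engulfing", "dark_cloud", "hanging_man", "three_black"]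
def STRONG_BULLISH : PySem.Set String := PySem.Set.ofList
  ["bullish_engulfing", "morning_star", "three_white", "piercing_line", "bullish_marubozu"]
def MODERATE_BULLISH : PySem.Set String := PySem.Set.ofList
  ["hammer", "inverted_hammer", "bullish_harami", "tweezer_bottom", "dragonfly_doji"]

def pattern_score_bonus (patterns : List String) : Int :=
  let has_strong := patterns.any (fun p => PySem.Set.contains STRONG_BULLISH p)
  let has_moderate := patterns.any (fun p => PySem.Set.contains MODERATE_BULLISH p)
  let has_bearish := patterns.any (fun p => PySem.Set.contains BEARISH_PATTERNS p)
  let bonus : Int := 0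
  let bonus := if has_strong then bonus + 20 else if has_moderate then bonus + 10 else bonus
  let bonus := if has_bearish then bonus - 5 else bonus
  max bonus 0

-- ===== PORT B =====
def PATTERN_CATEGORY : PySem.Dict String String := PySem.Dict.ofList
  [("shooting_star", "bearish"), ("evening_star", "bearish"), ("bearish_engulfing", "bearish"),
   ("dark_cloud", "bearish"), ("hanging_man", "bearish"), ("three_black", "bearish"),
   ("bullish_engulfing", "strong"), ("morning_star", "strong"), ("three_white", "strong"),
   ("piercing_line", "strong"), ("bullish_marubozu", "strong"),
   ("hammer", "moderate"), ("inverted_hammer", "moderate"), ("bullish_harami", "moderate"),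
   ("tweezer_bottom", "moderate"), ("dragonfly_doji", "moderate")]

def pattern_score_bonus_alt (patterns : List String) : Int :=
  let seen : PySem.Set String := patterns.foldl
    (fun s p =>
      match PySem.Dict.get? PATTERN_CATEGORY p with
      | some c => PySem.Set.add s c
      | none => s)
    PySem.Set.empty
  let bonus : Int :=
    if PySem.Set.contains seen "strong" then 20
    else if PySem.Set.contains seen "moderate" then 10 else 0
  let bonus := if PySem.Set.contains seen "bearish" then bonus - 5 else bonus
  max bonus 0

-- ===== PRECONDITION & SPEC =====
def Spec_pattern_score_bonus (patterns : List String) (out : Int) : Prop := out = pattern_score_bonus_alt patterns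
instance (patterns : List String) (out : Int) : Decidable (Spec_pattern_score_bonus patterns out) := by unfold Spec_pattern_score_bonus; infer_instance

-- ===== CLAIM (what is proved, stated in full; the proofs are below) =====
def Claim_equal_pattern_score_bonus : Prop := ∀ (patterns : List String), Dom_pattern_score_bonus patterns → Spec_pattern_score_bonus patterns (pattern_score_bonus patterns)

-- ===== LEMMAS AND PROOFS =====

-- category membership of B's seen-set after the fold ↔ one of the corresponding keys occurs
theorem seen_mem (ps : List String) (s : PySem.Set String) (c : String) :
    (c ∈ ps.foldl
      (fun s p =>
        match PySem.Dict.get? PATTERN_CATEGORY p with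
        | some c => PySem.Set.add s c
        | none => s) s)
    ↔ (c ∈ s ∨ ps.any (fun p => PySem.Dict.get? PATTERN_CATEGORY p == some c)) := by
  induction ps generalizing s with
  | nil => simp
  | cons p ps ih =>
    simp only [List.foldl_cons, List.any_cons, ih]
    cases h : PySem.Dict.get? PATTERN_CATEGORY p with
    | none => simp [h]
    | some c' =>
      simp only [h, PySem.Set.mem_add, beq_iff_eq, Option.some.injEq, Bool.or_eq_true,
        decide_eq_true_eq]
      constructor
      · rintro (h1 | h1)
        · rcases h1 with h1 | h1
          · exact Or.inl h1
          · exact Or.inr (Or.inl h1.symm)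
        · exact Or.inr (Or.inr h1)
      · rintro (h1 | h1 | h1)
        · exact Or.inl (Or.inl h1)
        · exact Or.inl (Or.inr h1.symm)
        · exact Or.inr h1



-- the literal ofList dict reduces to its item list (all keys distinct)
theorem pattern_category_eq : PATTERN_CATEGORY = PySem.Dict.mk
  [("shooting_star", "bearish"), ("evening_star", "bearish"), ("bearish_engulfing", "bearish"),
   ("dark_cloud", "bearish"), ("hanging_man", "bearish"), ("three_black", "bearish"),
   ("bullish_engulfing", "strong"), ("morning_star", "strong"), ("three_white", "strong"),
   ("piercing_line", "strong"), ("bullish_marubozu", "strong"),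
   ("hammer", "moderate"), ("inverted_hammer", "moderate"), ("bullish_harami", "moderate"),
   ("tweezer_bottom", "moderate"), ("dragonfly_doji", "moderate")] := by decide

-- the lookup table hits category c exactly when p is in A's corresponding set
theorem lookup_strong (p : String) :
    (PySem.Dict.get? PATTERN_CATEGORY p == some "strong") = PySem.Set.contains STRONG_BULLISH p := by
  rw [pattern_category_eq, Bool.eq_iff_iff, beq_iff_eq,
      PySem.Dict.get?_eq_some_iff_mem_items _ _ _ (by decide), PySem.Set.contains_iff]
  simp [STRONG_BULLISH, PySem.Set.ofList, PySem.Set.add, PySem.Set.empty, Prod.mk.injEq]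

theorem lookup_moderate (p : String) :
    (PySem.Dict.get? PATTERN_CATEGORY p == some "moderate") = PySem.Set.contains MODERATE_BULLISH p := by
  rw [pattern_category_eq, Bool.eq_iff_iff, beq_iff_eq,
      PySem.Dict.get?_eq_some_iff_mem_items _ _ _ (by decide), PySem.Set.contains_iff]
  simp [PySem.Set.ofList, MODERATE_BULLISH, PySem.Set.add, PySem.Set.empty, Prod.mk.injEq]

theorem lookup_bearish (p : String) :
    (PySem.Dict.get? PATTERN_CATEGORY p == some "bearish") = PySem.Set.contains BEARISH_PATTERNS p := by
  rw [pattern_category_eq, Bool.eq_iff_iff, beq_iff_eq,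
      PySem.Dict.get?_eq_some_iff_mem_items _ _ _ (by decide), PySem.Set.contains_iff]
  simp [BEARISH_PATTERNS, PySem.Set.ofList, PySem.Set.add, PySem.Set.empty, Prod.mk.injEq]

theorem seen_contains (ps : List String) (c : String) :
    PySem.Set.contains (ps.foldl
      (fun s p =>
        match PySem.Dict.get? PATTERN_CATEGORY p with
        | some c => PySem.Set.add s c
        | none => s) PySem.Set.empty) c
    = ps.any (fun p => PySem.Dict.get? PATTERN_CATEGORY p == some c) := by
  rw [Bool.eq_iff_iff, PySem.Set.contains_iff, seen_mem]
  simp [PySem.Set.empty]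

-- ===== VERDICT (by name: the statement is the Claim_ definition above) =====
theorem pattern_score_bonus_spec : Claim_equal_pattern_score_bonus := by
  intro patterns _
  unfold Spec_pattern_score_bonus pattern_score_bonus pattern_score_bonus_alt
  simp only [seen_contains]
  have hs : ∀ p, (PySem.Dict.get? PATTERN_CATEGORY p == some "strong") = PySem.Set.contains STRONG_BULLISH p := lookup_strong
  have hm := lookup_moderate
  have hb := lookup_bearish
  simp only [hs, hm, hb]
  split_ifs <;> norm_num
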